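-- pv_equiv track=rewrite | github.com/muitiiifruckt/python | Laba_1.py | check_signs
-- ===== SOURCE A (Python) =====
-- def check_signs(A, c, signs):
--     for i in range(len(signs)):
--         if signs[i] == -1: #   <=
--             for k in range(len(A)): # добавляем новую переменную в ограничения матрицы А
--                 A[k].append(1 if k == i else 0) # с положительном кэфом
--             c.append(0) # в целевую доп переменные идут с кэфом 0
--         elif signs[i] == 1:  #  >=
--             for k in range(len(A)): # добавляем новую переменную в ограничения матрицы А
--                 A[k].append(-1 if k == i else 0) #с отрицательным кэфом
--             c.append(0) # в целевую доп переменные идут с кэфом 0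
--     return A,c
-- ===== SOURCE B (Python) =====
-- def check_signs(A, c, signs):
--     # Pure rank-based construction: row k's slack block is all zeros except,
--     # when signs[k] is +-1, a single coefficient placed at the rank of k among
--     # the +-1 signs. No scan over other signs' columns per row.
--     # NOTE: A mutates its arguments in place; B builds fresh lists (same return value).
--     m = sum(1 for s in signs if s in (-1, 1))
--     newA = []
--     for k, row in enumerate(A):
--         if k < len(signs) and signs[k] in (-1, 1):
--             pos = sum(1 for s in signs[:k] if s in (-1, 1))
--             block = [0] * pos + [1 if signs[k] == -1 else -1] + [0] * (m - pos - 1)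
--         else:
--             block = [0] * m
--         newA.append(row + block)
--     return newA, c + [0] * m
-- ===== Notes on version B (the rewrite author's own statement) =====
-- stated objective: alternative
-- what changed: Instead of appending a unit column per sign (scanning all rows once per sign), B computes each row's whole slack block directly by rank arithmetic: the count m of +-1 signs gives the block width and the prefix count of +-1 signs before k gives the position of row k's single nonzero coefficient; rows and c are built fresh (A mutates in place, B does not; return values agree).
import Mathlib
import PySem

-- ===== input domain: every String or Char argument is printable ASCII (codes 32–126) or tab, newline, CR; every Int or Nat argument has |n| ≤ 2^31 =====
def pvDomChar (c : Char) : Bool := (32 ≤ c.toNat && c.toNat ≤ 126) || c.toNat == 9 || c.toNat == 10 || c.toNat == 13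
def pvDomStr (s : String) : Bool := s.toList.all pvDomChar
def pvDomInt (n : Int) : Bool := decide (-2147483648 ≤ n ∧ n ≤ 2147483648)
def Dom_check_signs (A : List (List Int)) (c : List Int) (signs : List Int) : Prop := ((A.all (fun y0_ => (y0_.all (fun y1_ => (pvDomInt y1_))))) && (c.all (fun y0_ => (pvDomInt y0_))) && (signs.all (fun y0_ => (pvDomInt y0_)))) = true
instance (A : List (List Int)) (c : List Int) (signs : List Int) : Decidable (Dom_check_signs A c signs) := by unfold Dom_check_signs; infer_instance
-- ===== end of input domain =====

-- B replaces the per-sign column appends by rank arithmetic building each row's slack block at once.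
-- Python A mutates A's rows and c in place, B builds fresh lists; the equivalence is about the return value.
-- ===== PORT A =====
-- enumeration of `for i in range(len(signs)): signs[i]` as (index, value) pairs
def csEnumFrom (n : Nat) : List Int → List (Nat × Int)
  | [] => []
  | s :: ss => (n, s) :: csEnumFrom (n + 1) ss

-- inner loop `for k in range(len(A)): A[k].append(v if k == i else 0)`
def csAddCol (i : Nat) (v : Int) : Nat → List (List Int) → List (List Int)
  | _, [] => []
  | k, r :: rs => (r ++ [if k = i then v else 0]) :: csAddCol i v (k + 1) rs

def csStep (st : List (List Int) × List Int) (p : Nat × Int) : List (List Int) × List Int :=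
  if p.2 = -1 then (csAddCol p.1 1 0 st.1, st.2 ++ [0])
  else if p.2 = 1 then (csAddCol p.1 (-1) 0 st.1, st.2 ++ [0])
  else st

def check_signs (A : List (List Int)) (c : List Int) (signs : List Int) : List (List Int) × List Int :=
  (csEnumFrom 0 signs).foldl csStep (A, c)

-- ===== PORT B =====
-- `sum(1 for s in ... if s in (-1, 1))`
def csCountAct : List Int → Nat
  | [] => 0
  | s :: ss => (if s = -1 ∨ s = 1 then 1 else 0) + csCountAct ss

-- the slack block of row k: `[0]*pos + [coef] + [0]*(m-pos-1)` or `[0]*m`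
def csBlock (signs : List Int) (m k : Nat) : List Int :=
  match signs[k]? with
  | some s =>
    if s = -1 ∨ s = 1 then
      let pos := csCountAct (signs.take k)
      List.replicate pos 0 ++ [if s = -1 then 1 else -1] ++ List.replicate (m - pos - 1) 0
    else List.replicate m 0
  | none => List.replicate m 0

-- `for k, row in enumerate(A): newA.append(row + block)`
def csRowsB (signs : List Int) (m : Nat) : Nat → List (List Int) → List (List Int)
  | _, [] => []
  | k, r :: rs => (r ++ csBlock signs m k) :: csRowsB signs m (k + 1) rs

def check_signs_alt (A : List (List Int)) (c : List Int) (signs : List Int) : List (List Int) × List Int :=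
  let m := csCountAct signs
  (csRowsB signs m 0 A, c ++ List.replicate m 0)

-- ===== PRECONDITION & SPEC =====
def Spec_check_signs (A : List (List Int)) (c : List Int) (signs : List Int) (out : List (List Int) × List Int) : Prop := out = check_signs_alt A c signs
instance (A : List (List Int)) (c : List Int) (signs : List Int) (out : List (List Int) × List Int) : Decidable (Spec_check_signs A c signs out) := by unfold Spec_check_signs; infer_instance

-- ===== CLAIM (what is proved, stated in full; the proofs are below) =====
def Claim_equal_check_signs : Prop := ∀ (A : List (List Int)) (c : List Int) (signs : List Int), Dom_check_signs A c signs → Spec_check_signs A c signs (check_signs A c signs)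

-- ===== LEMMAS AND PROOFS =====

-- proof-side bridge: the "active columns" view of A's loop
def csActivesFrom (n : Nat) : List Int → List (Nat × Int)
  | [] => []
  | s :: ss =>
    if s = -1 then (n, 1) :: csActivesFrom (n + 1) ss
    else if s = 1 then (n, -1) :: csActivesFrom (n + 1) ss
    else csActivesFrom (n + 1) ss

def csExtendRows (actives : List (Nat × Int)) : Nat → List (List Int) → List (List Int)
  | _, [] => []
  | k, r :: rs => (r ++ actives.map (fun p => if k = p.1 then p.2 else 0)) :: csExtendRows actives (k + 1) rs

lemma csExtendRows_nil (k : Nat) (rows : List (List Int)) :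
    csExtendRows [] k rows = rows := by
  induction rows generalizing k with
  | nil => rfl
  | cons r rs ih => simp [csExtendRows, ih]

lemma csExtendRows_cons (p : Nat × Int) (ps : List (Nat × Int)) (k : Nat) (rows : List (List Int)) :
    csExtendRows (p :: ps) k rows = csExtendRows ps k (csAddCol p.1 p.2 k rows) := by
  induction rows generalizing k with
  | nil => rfl
  | cons r rs ih => simp [csExtendRows, csAddCol, ih, List.append_assoc]

lemma csActivesFrom_length (n : Nat) (signs : List Int) :
    (csActivesFrom n signs).length = csCountAct signs := by
  induction signs generalizing n with
  | nil => rfl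
  | cons s ss ih =>
    by_cases h1 : s = -1
    · simp [csActivesFrom, csCountAct, h1, ih]; omega
    · by_cases h2 : s = 1
      · simp [csActivesFrom, csCountAct, h2, ih]; omega
      · simp [csActivesFrom, csCountAct, h1, h2, ih]

lemma cs_main (signs : List Int) (n : Nat) (A : List (List Int)) (c : List Int) :
    (csEnumFrom n signs).foldl csStep (A, c)
      = (csExtendRows (csActivesFrom n signs) 0 A,
         c ++ List.replicate (csActivesFrom n signs).length 0) := by
  induction signs generalizing n A c with
  | nil => simp [csEnumFrom, csActivesFrom, csExtendRows_nil]
  | cons s ss ih =>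
    by_cases h1 : s = -1
    · simp [csEnumFrom, csActivesFrom, h1, csStep, ih, csExtendRows_cons,
        List.replicate_succ, List.append_assoc]
    · by_cases h2 : s = 1
      · simp [csEnumFrom, csActivesFrom, h2, csStep, ih, csExtendRows_cons,
          List.replicate_succ, List.append_assoc]
      · simp [csEnumFrom, csActivesFrom, h1, h2, csStep, ih]

lemma cs_map_zero (signs : List Int) (n t : Nat) (ht : t < n) :
    (csActivesFrom n signs).map (fun p => if t = p.1 then p.2 else 0)
      = List.replicate (csActivesFrom n signs).length 0 := by
  induction signs generalizing n with
  | nil => rfl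
  | cons s ss ih =>
    have hne : t ≠ n := Nat.ne_of_lt ht
    have h' : t < n + 1 := Nat.lt_succ_of_lt ht
    by_cases h1 : s = -1
    · simp [csActivesFrom, h1, hne, ih _ h', List.replicate_succ]
    · by_cases h2 : s = 1
      · simp [csActivesFrom, h2, hne, ih _ h', List.replicate_succ]
      · simp [csActivesFrom, h1, h2, ih _ h']

lemma rep_one_add (m : Nat) : List.replicate (1 + m) (0 : Int) = 0 :: List.replicate m 0 := by
  rw [Nat.add_comm]; simp [List.replicate_succ]

lemma csBlock_zero_active (s : Int) (hs : s = -1 ∨ s = 1) (ss : List Int) (m : Nat) :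
    csBlock (s :: ss) (1 + m) 0 = (if s = -1 then 1 else -1) :: List.replicate m 0 := by
  simp [csBlock, hs, csCountAct]

lemma csBlock_zero_inactive (s : Int) (hs : ¬ (s = -1 ∨ s = 1)) (ss : List Int) (m : Nat) :
    csBlock (s :: ss) m 0 = List.replicate m 0 := by
  simp [csBlock, hs]

lemma csBlock_cons_active (s : Int) (hs : s = -1 ∨ s = 1) (ss : List Int) (m j : Nat) :
    csBlock (s :: ss) (1 + m) (j + 1) = 0 :: csBlock ss m j := by
  simp only [csBlock, List.getElem?_cons_succ, List.take_succ_cons]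
  cases hgs : ss[j]? with
  | none => exact rep_one_add m
  | some sv =>
    by_cases hsv : sv = -1 ∨ sv = 1
    · have hc : csCountAct (s :: List.take j ss) = 1 + csCountAct (List.take j ss) := by
        simp [csCountAct, hs]
      have hsub : 1 + m - (1 + csCountAct (List.take j ss)) - 1
          = m - csCountAct (List.take j ss) - 1 := by omega
      simp [hsv, hc, hsub, rep_one_add]
    · simp [hsv, rep_one_add]

lemma csBlock_cons_inactive (s : Int) (hs : ¬ (s = -1 ∨ s = 1)) (ss : List Int) (m j : Nat) :
    csBlock (s :: ss) m (j + 1) = csBlock ss m j := by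
  simp only [csBlock, List.getElem?_cons_succ, List.take_succ_cons]
  cases hgs : ss[j]? with
  | none => rfl
  | some sv =>
    by_cases hsv : sv = -1 ∨ sv = 1
    · have hc : csCountAct (s :: List.take j ss) = csCountAct (List.take j ss) := by
        simp [csCountAct, hs]
      simp [hsv, hc]
    · simp [hsv]

lemma csCountAct_cons_active (s : Int) (hs : s = -1 ∨ s = 1) (ss : List Int) :
    csCountAct (s :: ss) = 1 + csCountAct ss := by simp [csCountAct, hs]

lemma csCountAct_cons_inactive (s : Int) (hs : ¬ (s = -1 ∨ s = 1)) (ss : List Int) :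
    csCountAct (s :: ss) = csCountAct ss := by simp [csCountAct, hs]

lemma cs_block_eq (signs : List Int) (n j : Nat) :
    (csActivesFrom n signs).map (fun p => if n + j = p.1 then p.2 else 0)
      = csBlock signs (csCountAct signs) j := by
  induction signs generalizing n j with
  | nil => simp [csActivesFrom, csBlock, csCountAct]
  | cons s ss ih =>
    have heq : ∀ j' : Nat, n + (j' + 1) = (n + 1) + j' := by omega
    by_cases hs : s = -1 ∨ s = 1
    · have hhead : csActivesFrom n (s :: ss)
          = (n, if s = -1 then 1 else -1) :: csActivesFrom (n + 1) ss := by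
        rcases hs with h | h <;> simp [csActivesFrom, h]
      rw [hhead, csCountAct_cons_active s hs]
      cases j with
      | zero =>
        rw [csBlock_zero_active s hs]
        simp [cs_map_zero ss (n + 1) n (Nat.lt_succ_self n), csActivesFrom_length]
      | succ j' =>
        rw [csBlock_cons_active s hs]
        have hne : n + 1 + j' ≠ n := by omega
        simp only [List.map_cons, heq j', if_neg hne, ih (n + 1) j']
    · have hhead : csActivesFrom n (s :: ss) = csActivesFrom (n + 1) ss := by
        have h1 : s ≠ -1 := fun h => hs (Or.inl h)
        have h2 : s ≠ 1 := fun h => hs (Or.inr h)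
        simp [csActivesFrom, h1, h2]
      rw [hhead, csCountAct_cons_inactive s hs]
      cases j with
      | zero =>
        rw [csBlock_zero_inactive s hs]
        simp [cs_map_zero ss (n + 1) n (Nat.lt_succ_self n), csActivesFrom_length]
      | succ j' =>
        rw [csBlock_cons_inactive s hs]
        rw [show (fun p : Nat × Int => if n + (j' + 1) = p.1 then p.2 else 0)
              = (fun p : Nat × Int => if (n + 1) + j' = p.1 then p.2 else 0) from by
            funext p; rw [heq j']]
        exact ih (n + 1) j'

lemma cs_rows_eq (signs : List Int) (rows : List (List Int)) (k : Nat) :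
    csExtendRows (csActivesFrom 0 signs) k rows = csRowsB signs (csCountAct signs) k rows := by
  induction rows generalizing k with
  | nil => rfl
  | cons r rs ih =>
    have hb := cs_block_eq signs 0 k
    simp only [Nat.zero_add] at hb
    simp [csExtendRows, csRowsB, ih, hb]

-- ===== VERDICT (by name: the statement is the Claim_ definition above) =====
theorem check_signs_spec : Claim_equal_check_signs := by
  intro A c signs _
  unfold Spec_check_signs check_signs check_signs_alt
  rw [cs_main, cs_rows_eq, csActivesFrom_length]
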